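-- pv_equiv track=rewrite | github.com/SprieteJ/Exhibit_Library_React | Dashboard/api/ethereum.py | _inflections
-- ===== SOURCE A (Python) =====
-- def _inflections(slope_series):
--     result = [False] * len(slope_series)
--     for i in range(1, len(slope_series)):
--         if slope_series[i] is not None and slope_series[i - 1] is not None:
--             if (slope_series[i - 1] < 0 and slope_series[i] >= 0) or \
--                (slope_series[i - 1] > 0 and slope_series[i] <= 0):
--                 result[i] = True
--     return result
-- ===== SOURCE B (Python) =====
-- def _inflections(slope_series):
--     # Run-length scan: walk maximal runs of equal sign-key (None kept as its own key),
--     # mark only the first index of a run whose previous run had a nonzero sign.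
--     def key(x):
--         return None if x is None else (x > 0) - (x < 0)
--     out = []
--     prev = None
--     i, n = 0, len(slope_series)
--     while i < n:
--         k = key(slope_series[i])
--         j = i + 1
--         while j < n and key(slope_series[j]) == k:
--             j += 1
--         out.append(k is not None and prev is not None and prev != 0)
--         out.extend([False] * (j - i - 1))
--         prev = k
--         i = j
--     return out
-- ===== Notes on version B (the rewrite author's own statement) =====
-- stated objective: alternative
-- what changed: Replaces A's per-index loop comparing each element with its predecessor by a run-length scan: B walks maximal runs of equal sign-key (None its own key) and marks only the first index of a run whose preceding run had a nonzero sign.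
import Mathlib
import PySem

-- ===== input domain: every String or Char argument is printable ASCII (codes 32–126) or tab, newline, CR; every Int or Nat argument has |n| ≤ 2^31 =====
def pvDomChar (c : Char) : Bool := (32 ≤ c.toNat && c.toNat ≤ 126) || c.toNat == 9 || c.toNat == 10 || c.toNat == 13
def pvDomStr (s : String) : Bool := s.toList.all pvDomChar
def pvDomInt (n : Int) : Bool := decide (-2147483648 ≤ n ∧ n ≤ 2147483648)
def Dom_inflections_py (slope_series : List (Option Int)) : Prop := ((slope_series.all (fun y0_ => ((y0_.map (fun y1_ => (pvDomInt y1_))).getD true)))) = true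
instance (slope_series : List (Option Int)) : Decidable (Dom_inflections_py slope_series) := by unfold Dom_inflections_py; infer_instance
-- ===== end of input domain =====

-- B replaces A's per-index adjacent-comparison loop with a run-length scan over maximal
-- runs of equal sign-key, marking only each run's first index; objective: alternative, same O(n) cost.


-- ===== PORT A =====
-- the body of A's 'if slope_series[i] is not None and slope_series[i-1] is not None: if (...)' test
def crossA (slope_series : List (Option Int)) (i : Int) : Bool :=
  match PySem.List.pyGetD slope_series i none, PySem.List.pyGetD slope_series (i - 1) none with
  | some cur, some prev =>
      decide ((prev < 0 ∧ 0 ≤ cur) ∨ (0 < prev ∧ cur ≤ 0))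
  | _, _ => false

def inflections_py (slope_series : List (Option Int)) : List Bool :=
  (PySem.List.pyRange 1 (slope_series.length : Int) 1).foldl
    (fun result i =>
      if crossA slope_series i then PySem.List.pySetD result i true else result)
    (List.replicate slope_series.length false)

-- ===== PORT B =====
-- Python's key(x): None if x is None else (x > 0) - (x < 0)
def pySign (v : Int) : Int := (if 0 < v then 1 else 0) - (if v < 0 then 1 else 0)

def keyOf (x : Option Int) : Option Int := x.map pySign

-- Source B's outer while loop, one iteration per maximal run of equal key; the inner
-- 'while j < n and key == k' index scan becomes takeWhile/dropWhile on the suffix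
def runScan (xs : List (Option Int)) (prev : Option Int) : List Bool :=
  match xs with
  | [] => []
  | x :: rest =>
      let k := keyOf x
      let run := rest.takeWhile (fun y => keyOf y == k)
      let rest' := rest.dropWhile (fun y => keyOf y == k)
      (k.isSome && prev.isSome && !(prev == some 0))
        :: (List.replicate run.length false ++ runScan rest' k)
termination_by xs.length
decreasing_by
  simp only [List.length_cons]
  have := List.length_dropWhile_le (fun y => keyOf y == keyOf x) rest
  omega

def inflections_py_alt (slope_series : List (Option Int)) : List Bool :=
  runScan slope_series none

-- ===== PRECONDITION & SPEC =====
def Spec_inflections_py (slope_series : List (Option Int)) (out : List Bool) : Prop := out = inflections_py_alt slope_series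
instance (slope_series : List (Option Int)) (out : List Bool) : Decidable (Spec_inflections_py slope_series out) := by unfold Spec_inflections_py; infer_instance

-- ===== CLAIM (what is proved, stated in full; the proofs are below) =====
def Claim_equal_inflections_py : Prop := ∀ (slope_series : List (Option Int)), Dom_inflections_py slope_series → Spec_inflections_py slope_series (inflections_py slope_series)

-- ===== LEMMAS AND PROOFS =====

-- proof-side pairwise reference: element j is cross of adjacent keys
def cross (po k : Option Int) : Bool :=
  match po, k with
  | some p, some c => decide (p ≠ 0) && decide (p ≠ c)
  | _, _ => false

def specGo (xs : List (Option Int)) (po : Option Int) : List Bool :=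
  match xs with
  | [] => []
  | x :: rest => cross po (keyOf x) :: specGo rest (keyOf x)

theorem crossKey_self (k : Option Int) : cross k k = false := by
  cases k <;> simp [cross]

-- getElem? through the fold: an index is true iff some in-range i with C i wrote it
theorem getElem?_foldl_set (C : Int → Bool) (l : List Int) (acc : List Bool) (j : Nat)
    (hl : ∀ i ∈ l, 0 ≤ i ∧ i < (acc.length : Int)) :
    (l.foldl (fun r i => if C i then PySem.List.pySetD r i true else r) acc)[j]? =
      if ∃ i ∈ l, i = (j : Int) ∧ C i then some true else acc[j]? := by
  induction l generalizing acc with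
  | nil => simp
  | cons i l ih =>
      have hi := hl i (by simp)
      have hl' : ∀ i' ∈ l, 0 ≤ i' ∧ i' < (((if C i then PySem.List.pySetD acc i true else acc).length : Nat) : Int) := by
        intro i' hi'
        have := hl i' (by simp [hi'])
        split
        · rwa [PySem.List.length_pySetD]
        · exact this
      simp only [List.foldl_cons]
      rw [ih _ hl']
      by_cases hex : ∃ i' ∈ l, i' = (j : Int) ∧ C i'
      · have hex' : ∃ i' ∈ i :: l, i' = (j : Int) ∧ C i' := by
          obtain ⟨i', h1, h2⟩ := hex; exact ⟨i', by simp [h1], h2⟩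
        rw [if_pos hex, if_pos hex']
      · rw [if_neg hex]
        by_cases hij : i = (j : Int) ∧ C i
        · have hex' : ∃ i' ∈ i :: l, i' = (j : Int) ∧ C i' := ⟨i, by simp, hij⟩
          rw [if_pos hex', if_pos hij.2]
          rw [PySem.List.pySetD_of_nonneg _ _ hi.1]
          have hjlt : j < acc.length := by omega
          have : i.toNat = j := by omega
          rw [this, List.getElem?_set_self (by omega)]
        · have : ¬ ∃ i' ∈ i :: l, i' = (j : Int) ∧ C i' := by
            rintro ⟨i', hmem, h1, h2⟩
            rcases List.mem_cons.mp hmem with rfl | h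
            · exact hij ⟨h1, h2⟩
            · exact hex ⟨i', h, h1, h2⟩
          rw [if_neg this]
          split
          · rename_i hC
            rw [PySem.List.pySetD_of_nonneg _ _ hi.1]
            have : i.toNat ≠ j := by
              intro h; exact hij ⟨by omega, hC⟩
            rw [List.getElem?_set_ne this]
          · rfl

theorem inflections_py_getElem? (ss : List (Option Int)) (j : Nat) :
    (inflections_py ss)[j]? =
      if _h : j < ss.length then
        some (if 1 ≤ j then crossA ss (j : Int) else false)
      else none := by
  unfold inflections_py
  rw [getElem?_foldl_set _ _ _ _ (by
    intro i hi
    rw [PySem.List.mem_pyRange_one] at hi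
    constructor <;> [omega; simpa using hi.2])]
  by_cases h : j < ss.length
  · simp only [h, dif_pos]
    by_cases h1 : 1 ≤ j
    · by_cases hC : crossA ss (j : Int)
      · have : ∃ i ∈ PySem.List.pyRange 1 (ss.length : Int) 1, i = (j : Int) ∧ crossA ss i := by
          refine ⟨(j : Int), ?_, rfl, hC⟩
          rw [PySem.List.mem_pyRange_one]; omega
        rw [if_pos this]
        simp [h1, hC]
      · have : ¬ ∃ i ∈ PySem.List.pyRange 1 (ss.length : Int) 1, i = (j : Int) ∧ crossA ss i := by
          rintro ⟨i, hmem, rfl, hc⟩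
          exact hC (by exact_mod_cast hc)
        rw [if_neg this]
        simp only [Bool.not_eq_true] at hC
        simp [h1, hC, h]
    · have : ¬ ∃ i ∈ PySem.List.pyRange 1 (ss.length : Int) 1, i = (j : Int) ∧ crossA ss i := by
        rintro ⟨i, hmem, rfl, _⟩
        rw [PySem.List.mem_pyRange_one] at hmem
        omega
      rw [if_neg this]
      simp [h1, h]
  · have : ¬ ∃ i ∈ PySem.List.pyRange 1 (ss.length : Int) 1, i = (j : Int) ∧ crossA ss i := by
      rintro ⟨i, hmem, rfl, _⟩
      rw [PySem.List.mem_pyRange_one] at hmem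
      omega
    rw [if_neg this]
    simp [h]

-- specGo over a run of key k (preceded by key k) is all-false
theorem specGo_run (run rest : List (Option Int)) (k : Option Int)
    (hk : ∀ y ∈ run, keyOf y = k) :
    specGo (run ++ rest) k = List.replicate run.length false ++ specGo rest k := by
  induction run with
  | nil => simp
  | cons y run ih =>
      have hy : keyOf y = k := hk y (by simp)
      simp only [List.cons_append, specGo, hy, List.length_cons,
        List.replicate_succ, List.cons_append]
      rw [crossKey_self]
      exact congrArg _ (ih (fun y' h => hk y' (by simp [h])))

-- runScan equals specGo whenever the head's key differs from po (or po can't mark)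
theorem runScan_eq_specGo (xs : List (Option Int)) (po : Option Int)
    (H : ∀ x, xs.head? = some x → keyOf x ≠ po ∨ po = none ∨ po = some 0) :
    runScan xs po = specGo xs po := by
  induction hn : xs.length using Nat.strong_induction_on generalizing xs po with
  | _ n ih =>
    cases xs with
    | nil => simp [runScan, specGo]
    | cons x rest =>
      rw [runScan]
      have hsplit : rest = rest.takeWhile (fun y => keyOf y == keyOf x)
          ++ rest.dropWhile (fun y => keyOf y == keyOf x) := (List.takeWhile_append_dropWhile).symm
      have hmark : (((keyOf x).isSome && po.isSome && !(po == some 0)) : Bool) = cross po (keyOf x) := by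
        rcases H x rfl with hne | rfl | rfl
        · cases hpo : po with
          | none => cases keyOf x <;> simp [cross]
          | some p =>
            cases hk : keyOf x with
            | none => simp [cross]
            | some c =>
              subst hpo
              have hpc : p ≠ c := by rintro rfl; exact hne (by rw [hk])
              by_cases hp0 : p = 0 <;> simp [cross, hp0, hpc]
        · cases keyOf x <;> simp [cross]
        · cases keyOf x <;> simp [cross]
      rw [hmark]
      have hrec : runScan (rest.dropWhile (fun y => keyOf y == keyOf x)) (keyOf x)
          = specGo (rest.dropWhile (fun y => keyOf y == keyOf x)) (keyOf x) := by
        refine ih ((rest.dropWhile (fun y => keyOf y == keyOf x)).length) ?_ _ _ ?_ rfl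
        · have := List.length_dropWhile_le (fun y => keyOf y == keyOf x) rest
          simp only [← hn, List.length_cons]
          omega
        · intro y hy
          left
          have := List.head?_dropWhile_not (fun y => keyOf y == keyOf x) rest
          rw [hy] at this
          simpa using this
      rw [hrec]
      conv_rhs => rw [specGo]
      congr 1
      conv_rhs => rw [hsplit]
      rw [specGo_run _ _ _ (fun y hy => by simpa using List.mem_takeWhile_imp hy)]

-- (specGo xs po)[j]? = cross of adjacent keys
theorem specGo_getElem? (xs : List (Option Int)) (po : Option Int) (j : Nat) :
    (specGo xs po)[j]? =
      if h : j < xs.length then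
        some (cross (if h1 : 1 ≤ j then keyOf (xs[j-1]'(by omega)) else po) (keyOf (xs[j]'h)))
      else none := by
  induction xs generalizing po j with
  | nil => simp [specGo]
  | cons x rest ih =>
    cases j with
    | zero => simp [specGo]
    | succ k =>
      simp only [specGo, List.getElem?_cons_succ, List.length_cons]
      rw [ih (keyOf x) k]
      by_cases hk : k < rest.length
      · rw [dif_pos hk, dif_pos (show k + 1 < rest.length + 1 by omega)]
        congr 1
        by_cases h1 : 1 ≤ k
        · rw [dif_pos h1, dif_pos (show 1 ≤ k + 1 by omega)]
          obtain ⟨m, rfl⟩ : ∃ m, k = m + 1 := ⟨k - 1, by omega⟩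
          simp [List.getElem_cons_succ]
        · have hk0 : k = 0 := by omega
          subst hk0
          rw [dif_neg (by omega), dif_pos (le_refl 1)]
          simp
      · rw [dif_neg hk, dif_neg (show ¬ (k + 1 < rest.length + 1) by omega)]

-- crossA at 1 ≤ j < n equals cross of the adjacent keys
theorem crossA_eq_cross (ss : List (Option Int)) (j : Nat) (h1 : 1 ≤ j) (h2 : j < ss.length) :
    crossA ss (j : Int) = cross (keyOf (ss[j-1]'(by omega))) (keyOf (ss[j]'h2)) := by
  unfold crossA cross keyOf
  have e1 : PySem.List.pyGetD ss (j : Int) none = ss[j]'h2 := by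
    rw [PySem.List.pyGetD_eq_getElem ss none (by omega) (by exact_mod_cast h2)]
    simp
  have e2 : PySem.List.pyGetD ss ((j : Int) - 1) none = ss[j-1]'(by omega) := by
    rw [PySem.List.pyGetD_eq_getElem ss none (by omega) (by omega)]
    congr 1; omega
  rw [e1, e2]
  rcases hc : ss[j]'h2 with _ | cur <;> rcases hp : ss[j-1]'(by omega) with _ | prev <;>
      simp only [Option.map_none, Option.map_some]
  all_goals first
    | rfl
    | (simp only [pySign]; split_ifs <;> simp <;> omega)

-- ===== VERDICT (by name: the statement is the Claim_ definition above) =====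
theorem inflections_py_spec : Claim_equal_inflections_py := by
  intro ss _
  unfold Spec_inflections_py inflections_py_alt
  rw [runScan_eq_specGo ss none (by intro x _; right; left; rfl)]
  apply List.ext_getElem?
  intro j
  rw [inflections_py_getElem?, specGo_getElem?]
  by_cases h : j < ss.length
  · rw [dif_pos h, dif_pos h]
    by_cases h1 : 1 ≤ j
    · rw [if_pos h1, dif_pos h1, crossA_eq_cross ss j h1 h]
    · have : j = 0 := by omega
      subst this
      simp [cross]
  · rw [dif_neg h, dif_neg h]
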